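-- pv_equiv track=rewrite | github.com/r1-12king/CodingInterviewChinese2-python | 46_TranslateNumbersToStrings.py | get_translation_count
-- ===== SOURCE A (Python) =====
-- def get_translation_count(num):
--     if num < 0:
--         return 0
--
--     strNum = str(num)
--     lens = len(strNum)
--     counts = [0] * lens
--
--     for i in range(lens - 1, -1, -1):
--         if i == lens - 1:
--             counts[i] = 1
--             continue
--
--         count = counts[i + 1]
--         value = (ord(strNum[i]) - ord('0')) * \
--             10 + ord(strNum[i + 1]) - ord('0')
--         if 10 <= value <= 25:
--             if i == lens - 2:
--                 count += 1
--             else: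
--                 count += counts[i + 2]
--         counts[i] = count
--
--     return counts[0]
-- ===== SOURCE B (Python) =====
-- def _fib(n):
--     a, b = 1, 1
--     for _ in range(n - 1):
--         a, b = b, a + b
--     return b
--
-- def get_translation_count(num):
--     if num < 0:
--         return 0
--     s = str(num)
--     edges = [10 <= (ord(a) - ord('0')) * 10 + ord(b) - ord('0') <= 25
--              for a, b in zip(s, s[1:])]
--     total, run = 1, 0
--     for e in edges:
--         if e:
--             run += 1
--         else:
--             total *= _fib(run + 1)
--             run = 0
--     return total * _fib(run + 1)
-- ===== Notes on version B (the rewrite author's own statement) =====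
-- stated objective: alternative
-- what changed: Instead of A's backward DP filling a counts array with the two-term recurrence, B uses the multiplicative factorization of the count: it computes the validity flag of each adjacent digit pair once, and the answer is the product over maximal runs of consecutive valid pairs of the Fibonacci number of the run length, accumulated in a single fold with a helper iterative Fibonacci.
import Mathlib
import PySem

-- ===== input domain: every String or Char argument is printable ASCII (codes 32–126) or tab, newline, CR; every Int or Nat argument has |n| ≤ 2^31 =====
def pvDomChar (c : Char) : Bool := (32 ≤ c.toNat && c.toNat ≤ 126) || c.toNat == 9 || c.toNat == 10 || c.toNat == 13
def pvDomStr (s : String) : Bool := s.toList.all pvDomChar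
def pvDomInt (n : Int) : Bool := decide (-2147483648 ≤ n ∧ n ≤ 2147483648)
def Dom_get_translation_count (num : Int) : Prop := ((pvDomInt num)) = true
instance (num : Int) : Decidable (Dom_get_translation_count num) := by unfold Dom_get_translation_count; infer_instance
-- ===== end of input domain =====

-- B replaces A's backward DP over an allocated counts array by a different algorithm:
-- the answer factorizes as the product, over maximal runs of consecutive valid digit
-- pairs, of the Fibonacci number of the run length; B computes the pair-validity flags
-- once and folds over them multiplying Fibonacci factors. Same O(n) time.

-- ===== PORT A =====
-- loop body of A's backward `for i in range(lens-1, -1, -1)` (counts is the mutated list)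
def pvAStep (s : List Char) (counts : List Int) (i : Int) : List Int :=
  if i = PySem.List.len s - 1 then PySem.List.pySetD counts i 1
  else
    let count := PySem.List.pyGetD counts (i + 1) 0
    let value : Int := (((PySem.List.pyGetD s i ' ').toNat : Int) - ('0'.toNat : Int)) * 10
        + ((PySem.List.pyGetD s (i + 1) ' ').toNat : Int) - ('0'.toNat : Int)
    let count := if 10 ≤ value ∧ value ≤ 25 then
        (if i = PySem.List.len s - 2 then count + 1 else count + PySem.List.pyGetD counts (i + 2) 0)
      else count
    PySem.List.pySetD counts i count

def get_translation_count (num : Int) : Int :=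
  if num < 0 then 0
  else
    let strNum := PySem.Int.toChars num
    let lens : Int := PySem.List.len strNum
    let counts : List Int := List.replicate strNum.length 0
    let counts := (PySem.List.pyRange (lens - 1) (-1) (-1)).foldl (pvAStep strNum) counts
    PySem.List.pyGetD counts 0 0

-- ===== PORT B =====
-- the pair condition B tests on adjacent digit characters a b (Source B's comprehension body)
def pvOk (a b : Char) : Bool :=
  decide (10 ≤ ((a.toNat : Int) - ('0'.toNat : Int)) * 10 + (b.toNat : Int) - ('0'.toNat : Int)
    ∧ ((a.toNat : Int) - ('0'.toNat : Int)) * 10 + (b.toNat : Int) - ('0'.toNat : Int) ≤ 25)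

-- Source B's _fib(n): a,b = 1,1; for _ in range(n-1): a,b = b,a+b; return b
def pvFib (n : Int) : Int :=
  ((PySem.List.pyRange 0 (n - 1) 1).foldl (fun (p : Int × Int) (_ : Int) => (p.2, p.1 + p.2)) (1, 1)).2

def get_translation_count_alt (num : Int) : Int :=
  if num < 0 then 0
  else
    let s := PySem.Int.toChars num
    let edges := (List.zip s (PySem.List.slice s (some 1) none)).map (fun p => pvOk p.1 p.2)
    let st := edges.foldl (fun (p : Int × Int) (e : Bool) =>
        if e then (p.1, p.2 + 1) else (p.1 * pvFib (p.2 + 1), 0)) (1, 0)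
    st.1 * pvFib (st.2 + 1)

-- ===== PRECONDITION & SPEC =====
def Spec_get_translation_count (num : Int) (out : Int) : Prop := out = get_translation_count_alt num
instance (num : Int) (out : Int) : Decidable (Spec_get_translation_count num out) := by unfold Spec_get_translation_count; infer_instance

-- ===== CLAIM (what is proved, stated in full; the proofs are below) =====
def Claim_equal_get_translation_count : Prop := ∀ (num : Int), Dom_get_translation_count num → Spec_get_translation_count num (get_translation_count num)

-- ===== LEMMAS AND PROOFS =====

-- the number of translations of a character list (front-peeling recurrence)
def pvF : List Char → Int
  | [] => 1
  | [_] => 1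
  | a :: b :: t => pvF (b :: t) + (if pvOk a b then pvF t else 0)

theorem pvF_of_len_le_one (l : List Char) (h : l.length ≤ 1) : pvF l = 1 := by
  match l with
  | [] => rfl
  | [_] => rfl
  | _ :: _ :: _ => simp at h

-- ---------- A's loop ----------

-- the counts list after A has processed indices lens-1, …, i
def pvCountsAt (s : List Char) (i : Nat) : List Int :=
  List.replicate i 0 ++ (List.range (s.length - i)).map (fun k => pvF (s.drop (i + k)))

theorem pvCountsAt_getD (s : List Char) (i k : Nat) (h : i + k < s.length) :
    (pvCountsAt s i).getD (i + k) 0 = pvF (s.drop (i + k)) := by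
  unfold pvCountsAt
  rw [List.getD_eq_getElem?_getD, List.getElem?_append_right (by simp),
    List.length_replicate]
  have : i + k - i = k := by omega
  rw [this, List.getElem?_map, List.getElem?_range (by omega)]
  rfl

theorem pvCountsAt_set (s : List Char) (i : Nat) (h : i < s.length) :
    (pvCountsAt s (i + 1)).set i (pvF (s.drop i)) = pvCountsAt s i := by
  unfold pvCountsAt
  rw [List.replicate_succ', List.append_assoc,
    List.set_append_right i _ (by simp), List.length_replicate]
  have hr : s.length - i = (s.length - (i + 1)) + 1 := by omega
  rw [hr, List.range_succ_eq_map]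
  simp only [Nat.sub_self, List.set_cons_zero, List.singleton_append, List.map_cons,
    List.map_map, Nat.add_zero]
  congr 2
  apply List.map_congr_left
  intro k _
  simp only [Function.comp_apply]
  congr 2
  omega

theorem pvAStep_countsAt (s : List Char) (i : Nat) (h : i + 1 ≤ s.length) :
    pvAStep s (pvCountsAt s (i + 1)) (i : Int) = pvCountsAt s i := by
  have hlen : PySem.List.len s = (s.length : Int) := PySem.List.len_eq s
  simp only [pvAStep, hlen]
  by_cases hlast : i + 1 = s.length
  · rw [if_pos (by omega), PySem.List.pySetD_natCast]
    have h1 : pvF (s.drop i) = 1 :=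
      pvF_of_len_le_one _ (by rw [List.length_drop]; omega)
    rw [← h1, pvCountsAt_set s i (by omega)]
  · -- i + 2 ≤ s.length : the general backward step
    have h2 : i + 2 ≤ s.length := by omega
    rw [if_neg (by omega)]
    have ei1 : (i : Int) + 1 = ((i + 1 : Nat) : Int) := by push_cast; omega
    have ei2 : (i : Int) + 2 = ((i + 2 : Nat) : Int) := by push_cast; omega
    have hg1 : PySem.List.pyGetD (pvCountsAt s (i + 1)) ((i : Int) + 1) 0
        = pvF (s.drop (i + 1)) := by
      rw [ei1, PySem.List.pyGetD_natCast]
      have := pvCountsAt_getD s (i + 1) 0 (by omega)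
      simpa using this
    have hsi : PySem.List.pyGetD s (i : Int) ' ' = s[i]'(by omega) := by
      rw [PySem.List.pyGetD_natCast, List.getD_eq_getElem?_getD,
        List.getElem?_eq_getElem (by omega)]; rfl
    have hsi1 : PySem.List.pyGetD s ((i : Int) + 1) ' ' = s[i + 1]'(by omega) := by
      rw [ei1, PySem.List.pyGetD_natCast, List.getD_eq_getElem?_getD,
        List.getElem?_eq_getElem (by omega)]; rfl
    have hcons1 : s.drop (i + 1) = s[i + 1]'(by omega) :: s.drop (i + 2) :=
      List.drop_eq_getElem_cons (by omega)
    have hcons0 : s.drop i = s[i]'(by omega) :: s.drop (i + 1) := by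
      rw [List.drop_eq_getElem_cons (show i < s.length by omega)]
    have hFi : pvF (s.drop i) = pvF (s.drop (i + 1))
        + (if pvOk (s[i]'(by omega)) (s[i + 1]'(by omega)) then pvF (s.drop (i + 2)) else 0) := by
      conv_lhs => rw [hcons0, hcons1]
      simp only [pvF]
      rw [← hcons1]
    rw [hg1, hsi, hsi1, PySem.List.pySetD_natCast]
    have hval : (if 10 ≤ (((s[i]'(by omega)).toNat : Int) - ('0'.toNat : Int)) * 10
            + ((s[i + 1]'(by omega)).toNat : Int) - ('0'.toNat : Int)
          ∧ (((s[i]'(by omega)).toNat : Int) - ('0'.toNat : Int)) * 10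
            + ((s[i + 1]'(by omega)).toNat : Int) - ('0'.toNat : Int) ≤ 25 then
          (if (i : Int) = (s.length : Int) - 2 then pvF (s.drop (i + 1)) + 1
            else pvF (s.drop (i + 1)) + PySem.List.pyGetD (pvCountsAt s (i + 1)) ((i : Int) + 2) 0)
        else pvF (s.drop (i + 1))) = pvF (s.drop i) := by
      rw [hFi]
      simp only [pvOk, decide_eq_true_eq]
      split_ifs with hv hi2
      · have hd2 : pvF (s.drop (i + 2)) = 1 :=
          pvF_of_len_le_one _ (by rw [List.length_drop]; omega)
        rw [hd2]
      · have hg2 : PySem.List.pyGetD (pvCountsAt s (i + 1)) ((i : Int) + 2) 0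
            = pvF (s.drop (i + 2)) := by
          rw [ei2, PySem.List.pyGetD_natCast]
          have := pvCountsAt_getD s (i + 1) 1 (by omega)
          simpa using this
        rw [hg2]
      · ring
    rw [hval, pvCountsAt_set s i (by omega)]

theorem pvA_loop (s : List Char) : ∀ (i : Nat), i ≤ s.length →
    (PySem.List.pyRange ((i : Int) - 1) (-1) (-1)).foldl (pvAStep s) (pvCountsAt s i)
      = pvCountsAt s 0 := by
  intro i
  induction i with
  | zero =>
    intro _
    rw [PySem.List.pyRange_neg_one_eq_nil (by omega)]
    rfl
  | succ i ih =>
    intro h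
    have hcast : ((i + 1 : Nat) : Int) - 1 = (i : Int) := by push_cast; omega
    rw [hcast, PySem.List.pyRange_neg_one_cons (by omega), List.foldl_cons,
      pvAStep_countsAt s i (by omega)]
    exact ih (by omega)

-- ---------- B's side: Fibonacci and run decomposition ----------

-- structural Fibonacci (tilings of an n-cell strip has fibS n ways, fibS 1 = 1, fibS 2 = 2)
def fibS : Nat → Int
  | 0 => 1
  | 1 => 1
  | n + 2 => fibS (n + 1) + fibS n

theorem pvFib_loop : ∀ n : Nat,
    (PySem.List.pyRange 0 (n : Int) 1).foldl (fun (p : Int × Int) (_ : Int) => (p.2, p.1 + p.2)) (1, 1)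
      = (fibS n, fibS (n + 1)) := by
  intro n
  induction n with
  | zero =>
    rw [PySem.List.pyRange_one_eq_nil (by omega)]
    rfl
  | succ n ih =>
    have hcast : ((n + 1 : Nat) : Int) = (n : Int) + 1 := by push_cast; omega
    rw [hcast, PySem.List.pyRange_one_succ_right (by omega), List.foldl_append, ih]
    simp only [List.foldl_cons, List.foldl_nil]
    cases n with
    | zero => rfl
    | succ m =>
      show (fibS (m + 1 + 1), fibS (m + 1) + fibS (m + 1 + 1))
          = (fibS (m + 1 + 1), fibS (m + 1 + 1 + 1))
      rw [show fibS (m + 1 + 1 + 1) = fibS (m + 1 + 1) + fibS (m + 1) from rfl, Int.add_comm]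

theorem pvFib_eq (n : Nat) : pvFib ((n : Int) + 1) = fibS (n + 1) := by
  unfold pvFib
  have : (n : Int) + 1 - 1 = (n : Int) := by omega
  rw [this, pvFib_loop n]

-- translation count as a function of the pair-validity flags
def pvG : List Bool → Int
  | [] => 1
  | e :: es => pvG es + (if e then pvG (es.drop 1) else 0)
termination_by l => l.length
decreasing_by
  · simp
  · simp only [List.length_cons, List.length_drop]; omega

-- the structural edge list of a character list
def pvEdgesS : List Char → List Bool
  | [] => []
  | [_] => []
  | a :: b :: t => pvOk a b :: pvEdgesS (b :: t)

theorem pvEdgesS_tail : ∀ (b : Char) (t : List Char),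
    (pvEdgesS (b :: t)).drop 1 = pvEdgesS t := by
  intro b t
  cases t with
  | nil => rfl
  | cons c t' => rfl

theorem pvF_eq_pvG : ∀ s : List Char, pvF s = pvG (pvEdgesS s) := by
  intro s
  induction s using pvF.induct with
  | case1 => simp [pvF, pvEdgesS, pvG]
  | case2 a => simp [pvF, pvEdgesS, pvG]
  | case3 a b t ih1 ih2 =>
    simp only [pvF, pvEdgesS, pvG, ih1, pvEdgesS_tail, ih2]

theorem pvZip_eq_pvEdgesS : ∀ s : List Char,
    (List.zip s s.tail).map (fun p => pvOk p.1 p.2) = pvEdgesS s := by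
  intro s
  induction s using pvF.induct with
  | case1 => rfl
  | case2 a => rfl
  | case3 a b t ih1 _ =>
    simp only [List.tail_cons, List.zip_cons_cons, List.map_cons, pvEdgesS]
    rw [← ih1]
    rfl

theorem pvG_cons (e : Bool) (es : List Bool) :
    pvG (e :: es) = pvG es + (if e then pvG (es.drop 1) else 0) := by
  rw [pvG]

theorem pvG_nil : pvG [] = 1 := by rw [pvG]

theorem pvG_replicate_true : ∀ r : Nat, pvG (List.replicate r true) = fibS (r + 1) := by
  intro r
  induction r using Nat.twoStepInduction with
  | zero =>
    show pvG [] = fibS 1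
    rw [pvG_nil]
    decide
  | one =>
    show pvG [true] = fibS 2
    rw [pvG_cons, if_pos rfl, show ([] : List Bool).drop 1 = [] from rfl, pvG_nil]
    decide
  | more r ih1 ih2 =>
    rw [show List.replicate (r + 2) true = true :: List.replicate (r + 1) true from rfl,
      pvG_cons, if_pos rfl,
      show (List.replicate (r + 1) true).drop 1 = List.replicate r true from rfl,
      ih1, ih2]
    show fibS (r + 1 + 1) + fibS (r + 1) = fibS (r + 2 + 1)
    rfl

theorem pvG_split : ∀ (r : Nat) (v : List Bool),
    pvG (List.replicate r true ++ false :: v) = fibS (r + 1) * pvG v := by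
  intro r
  induction r using Nat.twoStepInduction with
  | zero =>
    intro v
    rw [show List.replicate 0 true ++ false :: v = false :: v from rfl, pvG_cons,
      if_neg (by simp : ¬ (false = true))]
    show pvG v + 0 = fibS 1 * pvG v
    rw [show fibS 1 = 1 from rfl]
    ring
  | one =>
    intro v
    rw [show List.replicate 1 true ++ false :: v = true :: false :: v from rfl, pvG_cons,
      if_pos rfl, pvG_cons, if_neg (by simp : ¬ (false = true)),
      show (false :: v).drop 1 = v from rfl]
    show pvG v + 0 + pvG v = fibS 2 * pvG v
    rw [show fibS 2 = 2 from rfl]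
    ring
  | more r ih1 ih2 =>
    intro v
    rw [show List.replicate (r + 2) true ++ false :: v
        = true :: (List.replicate (r + 1) true ++ false :: v) from rfl, pvG_cons, if_pos rfl,
      show (List.replicate (r + 1) true ++ false :: v).drop 1
        = List.replicate r true ++ false :: v from rfl,
      ih1, ih2]
    show fibS (r + 1 + 1) * pvG v + fibS (r + 1) * pvG v = fibS (r + 2 + 1) * pvG v
    rw [show fibS (r + 2 + 1) = fibS (r + 1 + 1) + fibS (r + 1) from rfl]
    ring

theorem pvB_fold : ∀ (es : List Bool) (t r : Int) (rN : Nat), r = (rN : Int) →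
    (es.foldl (fun (p : Int × Int) (e : Bool) =>
        if e then (p.1, p.2 + 1) else (p.1 * pvFib (p.2 + 1), 0)) (t, r)).1
      * pvFib ((es.foldl (fun (p : Int × Int) (e : Bool) =>
        if e then (p.1, p.2 + 1) else (p.1 * pvFib (p.2 + 1), 0)) (t, r)).2 + 1)
      = t * pvG (List.replicate rN true ++ es) := by
  intro es
  induction es with
  | nil =>
    intro t r rN hr
    simp only [List.foldl_nil, List.append_nil]
    rw [hr, pvFib_eq, pvG_replicate_true]
  | cons e es ih =>
    intro t r rN hr
    cases e with
    | true =>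
      simp only [List.foldl_cons, if_true]
      rw [ih t (r + 1) (rN + 1) (by push_cast [hr]; omega)]
      congr 1
      rw [List.replicate_succ', List.append_assoc]
      rfl
    | false =>
      simp only [List.foldl_cons, Bool.false_eq_true, if_false]
      rw [hr, pvFib_eq, ih (t * fibS (rN + 1)) 0 0 rfl, pvG_split]
      rw [show List.replicate 0 true ++ es = es from rfl]
      ring

-- ---------- str(num) is a nonempty list for num ≥ 0 ----------

theorem pv_toDigitsCore_ne_nil (b : Nat) : ∀ (f n : Nat) (ds : List Char),
    0 < f ∨ ds ≠ [] → Nat.toDigitsCore b f n ds ≠ [] := by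
  intro f
  induction f with
  | zero =>
    intro n ds hds
    simpa [Nat.toDigitsCore] using hds.resolve_left (by omega)
  | succ f ih =>
    intro n ds _
    rw [Nat.toDigitsCore]
    split
    · exact List.cons_ne_nil _ _
    · exact ih _ _ (Or.inr (List.cons_ne_nil _ _))

theorem pv_toChars_ne_nil (num : Int) : PySem.Int.toChars num ≠ [] := by
  unfold PySem.Int.toChars
  split
  · exact List.cons_ne_nil _ _
  · exact pv_toDigitsCore_ne_nil 10 _ _ [] (Or.inl (by omega))

-- ---------- both programs compute pvF (str(num)) ----------

theorem pv_main (num : Int) : get_translation_count num = get_translation_count_alt num := by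
  by_cases hneg : num < 0
  · simp [get_translation_count, get_translation_count_alt, hneg]
  · simp only [get_translation_count, get_translation_count_alt, if_neg hneg]
    have hne : PySem.Int.toChars num ≠ [] := pv_toChars_ne_nil num
    set s := PySem.Int.toChars num with hs
    have hn : 1 ≤ s.length := List.length_pos_of_ne_nil hne
    have hlen : PySem.List.len s = (s.length : Int) := PySem.List.len_eq s
    -- A's side
    have hinit : List.replicate s.length (0 : Int) = pvCountsAt s s.length := by
      unfold pvCountsAt
      simp
    have hA : (PySem.List.pyRange (PySem.List.len s - 1) (-1) (-1)).foldl
        (pvAStep s) (List.replicate s.length 0) = pvCountsAt s 0 := by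
      rw [hinit, hlen]
      exact pvA_loop s s.length (le_refl _)
    rw [hA, PySem.List.pyGetD_zero]
    have h0 : (pvCountsAt s 0).getD 0 0 = pvF (s.drop 0) := by
      have := pvCountsAt_getD s 0 0 (by omega)
      simpa using this
    rw [h0, List.drop_zero]
    -- B's side
    rw [PySem.List.slice_from_one, pvZip_eq_pvEdgesS,
      pvB_fold (pvEdgesS s) 1 0 0 rfl]
    simp only [List.replicate, List.nil_append]
    rw [pvF_eq_pvG]
    ring

-- ===== VERDICT (by name: the statement is the Claim_ definition above) =====
theorem get_translation_count_spec : Claim_equal_get_translation_count := by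
  intro num _
  unfold Spec_get_translation_count
  exact pv_main num
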